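-- pv_equiv track=rewrite | github.com/easystreet31/ultimate-quest-service | app_core.py | _dedup_and_rank
-- ===== SOURCE A (Python) =====
-- from typing import Dict, Any, Optional, List, Tuple, Literal, Set
--
-- def _dedup_and_rank(rows: List[Tuple[str, str, int]]) -> Tuple[List[Tuple[str, str, int]], Dict[str, Tuple[int,int]]]:
--     best_by_key: Dict[str, Tuple[str, int]] = {}
--     for key, label, sp in rows:
--         if key not in best_by_key or sp > best_by_key[key][1]:
--             best_by_key[key] = (label, sp)
--     ordered = sorted(((k, v[0], v[1]) for k, v in best_by_key.items()),
--                      key=lambda t: (-t[2], t[1].lower()))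
--     rank_by_key: Dict[str, Tuple[int,int]] = {}
--     last_sp = None; current_rank = 0; seen = 0
--     for key, _, sp in ordered:
--         seen += 1
--         if last_sp is None or sp < last_sp:
--             current_rank = seen
--         rank_by_key[key] = (current_rank, sp)
--         last_sp = sp
--     return ordered, rank_by_key
-- ===== SOURCE B (Python) =====
-- def _dedup_and_rank(rows):
--     best_by_key = {}
--     for key, label, sp in rows:
--         if key not in best_by_key or sp > best_by_key[key][1]:
--             best_by_key[key] = (label, sp)
--     ordered = sorted(((k, v[0], v[1]) for k, v in best_by_key.items()),
--                      key=lambda t: (-t[2], t[1].lower()))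
--     # Competition rank by definition: 1 + number of strictly higher scores.
--     # Stateless -- no last_sp/current_rank/seen bookkeeping.
--     rank_by_key = {key: (1 + sum(1 for _, _, v in ordered if v > sp), sp)
--                    for key, _, sp in ordered}
--     return ordered, rank_by_key
-- ===== Notes on version B (the rewrite author's own statement) =====
-- stated objective: alternative
-- what changed: The stateful ranking loop carrying last_sp/current_rank/seen is replaced by the stateless definition of competition rank: each key's rank is computed directly as 1 + the count of strictly higher scores in the sorted list.
import Mathlib
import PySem

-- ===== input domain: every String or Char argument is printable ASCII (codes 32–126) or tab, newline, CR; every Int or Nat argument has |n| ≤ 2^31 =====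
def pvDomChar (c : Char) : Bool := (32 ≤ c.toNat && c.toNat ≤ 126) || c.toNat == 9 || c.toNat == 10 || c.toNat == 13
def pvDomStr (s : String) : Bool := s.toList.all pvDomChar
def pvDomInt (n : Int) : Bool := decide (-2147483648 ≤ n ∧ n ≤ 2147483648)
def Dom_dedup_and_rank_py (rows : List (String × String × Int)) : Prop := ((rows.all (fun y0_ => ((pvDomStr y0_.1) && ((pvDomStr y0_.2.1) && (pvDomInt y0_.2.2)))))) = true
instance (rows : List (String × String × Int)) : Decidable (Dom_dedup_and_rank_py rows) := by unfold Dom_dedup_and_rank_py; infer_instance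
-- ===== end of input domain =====

-- B keeps A's dedup-by-key-keeping-max pass and sort, but replaces the stateful
-- last_sp/current_rank/seen rank loop by the stateless definition of competition
-- rank: 1 + count of strictly higher scores (objective: alternative algorithm).

-- ===== PORT A =====
-- shared first half: both Pythons contain the identical dedup pass and sort
def pvBestStep (d : PySem.Dict String (String × Int)) (t : String × String × Int) :
    PySem.Dict String (String × Int) :=
  if d.contains t.1 = false ∨ (d.getD t.1 ("", 0)).2 < t.2.2 then d.insert t.1 (t.2.1, t.2.2) else d

def pvBest (rows : List (String × String × Int)) : PySem.Dict String (String × Int) :=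
  rows.foldl pvBestStep PySem.Dict.empty

def pvOrdered (rows : List (String × String × Int)) : List (String × String × Int) :=
  PySem.List.sorted2 (pvBest rows).items (fun t => -t.2.2) (fun t => PySem.Str.lower t.2.1) false

-- A's rank loop state: (rank_by_key, last_sp, current_rank, seen)
def pvCur (last : Option Int) (cur seen' : Int) (sp : Int) : Int :=
  match last with
  | none => seen'
  | some lastSp => if sp < lastSp then seen' else cur

def pvRankStep (st : PySem.Dict String (Int × Int) × Option Int × Int × Int)
    (t : String × String × Int) : PySem.Dict String (Int × Int) × Option Int × Int × Int :=
  let seen' := st.2.2.2 + 1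
  let cur' := pvCur st.2.1 st.2.2.1 seen' t.2.2
  (st.1.insert t.1 (cur', t.2.2), some t.2.2, cur', seen')

def dedup_and_rank_py (rows : List (String × String × Int)) :
    (List (String × String × Int)) × (List (String × Int × Int)) :=
  let ordered := pvOrdered rows
  let st := ordered.foldl pvRankStep
    ((PySem.Dict.empty : PySem.Dict String (Int × Int)), (none : Option Int), (0 : Int), (0 : Int))
  (ordered, st.1.items)

-- ===== PORT B =====
-- B's rank is stateless: sum(1 for … if v > sp) is the count of strictly
-- higher scores, ported as countP over the same sorted list
def dedup_and_rank_py_alt (rows : List (String × String × Int)) :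
    (List (String × String × Int)) × (List (String × Int × Int)) :=
  let ordered := pvOrdered rows
  (ordered,
   ordered.map (fun t => (t.1, (1 + (ordered.countP (fun u => decide (t.2.2 < u.2.2)) : Int), t.2.2))))

-- ===== PRECONDITION & SPEC =====
def Spec_dedup_and_rank_py (rows : List (String × String × Int)) (out : (List (String × String × Int)) × (List (String × Int × Int))) : Prop := out = dedup_and_rank_py_alt rows
instance (rows : List (String × String × Int)) (out : (List (String × String × Int)) × (List (String × Int × Int))) : Decidable (Spec_dedup_and_rank_py rows out) := by unfold Spec_dedup_and_rank_py; infer_instance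

-- ===== CLAIM (what is proved, stated in full; the proofs are below) =====
def Claim_equal_dedup_and_rank_py : Prop := ∀ (rows : List (String × String × Int)), Dom_dedup_and_rank_py rows → Spec_dedup_and_rank_py rows (dedup_and_rank_py rows)

-- ===== LEMMAS AND PROOFS =====

-- the strict lexicographic comparison sorted2 uses for key (-sp, label.lower())
def pvBefore (a b : String × String × Int) : Bool :=
  decide ((-a.2.2 : Int) < -b.2.2) ||
    (!decide ((-b.2.2 : Int) < -a.2.2) && decide (PySem.Str.lower a.2.1 < PySem.Str.lower b.2.1))

theorem pv_sorted2_eq (xs : List (String × String × Int)) :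
    PySem.List.sorted2 xs (fun t => -t.2.2) (fun t => PySem.Str.lower t.2.1) false
      = xs.foldl (fun acc x => PySem.List.insertBy pvBefore x acc) [] := rfl

theorem pvBefore_irrefl (a : String × String × Int) : pvBefore a a = false := by
  simp [pvBefore]

theorem pvBefore_trans : ∀ a b c, pvBefore a b = true → pvBefore b c = true → pvBefore a c = true := by
  intro a b c hab hbc
  simp only [pvBefore, Bool.or_eq_true, Bool.and_eq_true, Bool.not_eq_true',
    decide_eq_true_iff, decide_eq_false_iff_not] at hab hbc ⊢
  rcases hab with h1 | ⟨h2, h3⟩ <;> rcases hbc with h4 | ⟨h5, h6⟩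
  · exact Or.inl (lt_trans h1 h4)
  · exact Or.inl (lt_of_lt_of_le h1 (not_lt.mp h5))
  · exact Or.inl (lt_of_le_of_lt (not_lt.mp h2) h4)
  · exact Or.inr ⟨not_lt.mpr (le_trans (not_lt.mp h2) (not_lt.mp h5)), lt_trans h3 h6⟩

theorem pvBefore_asym : ∀ a b, pvBefore a b = true → pvBefore b a = false := by
  intro a b h
  by_contra hba
  have hba' : pvBefore b a = true := by revert hba; cases pvBefore b a <;> simp
  have := pvBefore_trans a b a h hba'
  rw [pvBefore_irrefl] at this
  exact Bool.noConfusion this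

theorem pv_pairwise_insertBy (x : String × String × Int) (l : List (String × String × Int))
    (hl : l.Pairwise (fun a b => pvBefore b a = false)) :
    (PySem.List.insertBy pvBefore x l).Pairwise (fun a b => pvBefore b a = false) := by
  induction l with
  | nil => simp [PySem.List.insertBy]
  | cons y ys ih =>
    rw [List.pairwise_cons] at hl
    obtain ⟨hy, hys⟩ := hl
    by_cases h : pvBefore x y = true
    · rw [show PySem.List.insertBy pvBefore x (y :: ys) = x :: y :: ys from by
        simp [PySem.List.insertBy, h]]
      refine List.pairwise_cons.mpr ⟨?_, List.pairwise_cons.mpr ⟨hy, hys⟩⟩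
      intro z hz
      rcases List.mem_cons.1 hz with rfl | hz
      · exact pvBefore_asym _ _ h
      · by_contra hzx
        have hzx' : pvBefore z x = true := by revert hzx; cases pvBefore z x <;> simp
        have := pvBefore_trans z x y hzx' h
        rw [hy z hz] at this
        exact Bool.noConfusion this
    · rw [show PySem.List.insertBy pvBefore x (y :: ys) = y :: PySem.List.insertBy pvBefore x ys from by
        simp [PySem.List.insertBy, h]]
      refine List.pairwise_cons.mpr ⟨?_, ih hys⟩
      intro z hz
      rcases (PySem.List.mem_insertBy pvBefore x z ys).1 hz with rfl | hz
      · simpa using h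
      · exact hy z hz

theorem pv_pairwise_foldl_insertBy (l : List (String × String × Int)) :
    ∀ acc, acc.Pairwise (fun a b => pvBefore b a = false) →
    (l.foldl (fun acc x => PySem.List.insertBy pvBefore x acc) acc).Pairwise
      (fun a b => pvBefore b a = false) := by
  induction l with
  | nil => intro acc h; simpa using h
  | cons x xs ih => intro acc h; exact ih _ (pv_pairwise_insertBy x acc h)

theorem pv_ordered_pairwise (rows : List (String × String × Int)) :
    (pvOrdered rows).Pairwise (fun a b => b.2.2 ≤ a.2.2) := by
  have h : (pvOrdered rows).Pairwise (fun a b => pvBefore b a = false) := by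
    unfold pvOrdered
    rw [pv_sorted2_eq]
    exact pv_pairwise_foldl_insertBy _ [] (by simp)
  refine h.imp ?_
  intro a b hab
  simp only [pvBefore, Bool.or_eq_false_iff, decide_eq_false_iff_not] at hab
  omega

theorem pv_best_keys_nodup (rows : List (String × String × Int)) : (pvBest rows).keys.Nodup := by
  have main : ∀ (l : List (String × String × Int)) (d : PySem.Dict String (String × Int)),
      d.keys.Nodup → (l.foldl pvBestStep d).keys.Nodup := by
    intro l
    induction l with
    | nil => intro d h; simpa using h
    | cons t ts ih =>
      intro d h
      refine ih _ ?_
      unfold pvBestStep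
      split_ifs with hc
      · exact PySem.Dict.nodup_keys_insert _ _ _ h
      · exact h
  exact main rows PySem.Dict.empty (by simp [PySem.Dict.keys, PySem.Dict.empty])

theorem pv_ordered_keys_nodup (rows : List (String × String × Int)) :
    ((pvOrdered rows).map (·.1)).Nodup := by
  have hp : (pvOrdered rows).Perm (pvBest rows).items := PySem.List.sorted2_perm _ _ _ _
  have hn : ((pvBest rows).items.map (·.1)).Nodup := pv_best_keys_nodup rows
  exact ((hp.map (·.1)).nodup_iff).2 hn

-- pure recursion computing A's rank loop output list
def pvRanksA : Option Int → Int → Int → List (String × String × Int) → List (String × Int × Int)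
  | _, _, _, [] => []
  | last, cur, seen, t :: ts =>
    (t.1, pvCur last cur (seen + 1) t.2.2, t.2.2)
      :: pvRanksA (some t.2.2) (pvCur last cur (seen + 1) t.2.2) (seen + 1) ts

theorem pv_foldl_rank_items : ∀ (l : List (String × String × Int))
    (d : PySem.Dict String (Int × Int)) (last : Option Int) (cur seen : Int),
    (l.map (·.1)).Nodup → (∀ t ∈ l, d.contains t.1 = false) →
    (l.foldl pvRankStep (d, last, cur, seen)).1.items = d.items ++ pvRanksA last cur seen l := by
  intro l
  induction l with
  | nil => intro d last cur seen _ _; simp [pvRanksA]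
  | cons t ts ih =>
    intro d last cur seen hnd hfresh
    rw [List.map_cons, List.nodup_cons] at hnd
    have hdt : d.contains t.1 = false := hfresh t (by simp)
    have step : pvRankStep (d, last, cur, seen) t
        = (d.insert t.1 (pvCur last cur (seen + 1) t.2.2, t.2.2), some t.2.2,
           pvCur last cur (seen + 1) t.2.2, seen + 1) := rfl
    rw [List.foldl_cons, step, ih _ _ _ _ hnd.2 ?fresh]
    · rw [PySem.Dict.items_insert_of_not_contains _ _ hdt, List.append_assoc]
      rfl
    case fresh =>
      intro u hu
      rw [PySem.Dict.contains_insert]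
      have hne : u.1 ≠ t.1 := by
        intro he
        exact hnd.1 (he ▸ List.mem_map_of_mem hu)
      simp [hne, hfresh u (List.mem_cons_of_mem _ hu)]

theorem pv_ranksA_some : ∀ (l pre : List (String × String × Int)) (L cur : Int),
    l.Pairwise (fun a b => b.2.2 ≤ a.2.2) →
    (∀ u ∈ l, u.2.2 ≤ L) →
    (∀ u ∈ pre, L ≤ u.2.2) →
    cur = 1 + (pre.countP (fun u => decide (L < u.2.2)) : Int) →
    pvRanksA (some L) cur (pre.length : Int) l
      = l.map (fun t => (t.1, (1 + ((pre ++ l).countP (fun u => decide (t.2.2 < u.2.2)) : Int), t.2.2))) := by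
  intro l
  induction l with
  | nil => intro pre L cur _ _ _ _; simp [pvRanksA]
  | cons t ts ih =>
    intro pre L cur hpw hle hge hcur
    rw [List.pairwise_cons] at hpw
    have htL : t.2.2 ≤ L := hle t (List.mem_cons_self ..)
    have hts0 : (t :: ts).countP (fun u => decide (t.2.2 < u.2.2)) = 0 := by
      rw [List.countP_eq_zero]
      intro u hu
      rcases List.mem_cons.1 hu with rfl | hu
      · simp
      · simpa using not_lt.mpr (hpw.1 u hu)
    have h1 : ([t].countP (fun u => decide (t.2.2 < u.2.2))) = 0 := by simp
    have hcur' : pvCur (some L) cur ((pre.length : Int) + 1) t.2.2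
        = 1 + ((pre ++ [t]).countP (fun u => decide (t.2.2 < u.2.2)) : Int) := by
      rw [show pvCur (some L) cur ((pre.length : Int) + 1) t.2.2
          = if t.2.2 < L then (pre.length : Int) + 1 else cur from rfl]
      rw [List.countP_append]
      by_cases hlt : t.2.2 < L
      · have hall : pre.countP (fun u => decide (t.2.2 < u.2.2)) = pre.length := by
          rw [List.countP_eq_length]
          intro u hu
          simpa using lt_of_lt_of_le hlt (hge u hu)
        rw [if_pos hlt, hall, h1]
        omega
      · have heq : t.2.2 = L := le_antisymm htL (not_lt.mp hlt)
        rw [if_neg hlt, h1, hcur, heq]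
        simp
    have hhead : pvCur (some L) cur ((pre.length : Int) + 1) t.2.2
        = 1 + ((pre ++ t :: ts).countP (fun u => decide (t.2.2 < u.2.2)) : Int) := by
      rw [hcur', List.countP_append, List.countP_append, hts0, h1]
    have hrec : pvRanksA (some t.2.2) (pvCur (some L) cur ((pre.length : Int) + 1) t.2.2)
        ((pre.length : Int) + 1) ts
        = ts.map (fun x => (x.1, (1 + ((pre ++ t :: ts).countP (fun u => decide (x.2.2 < u.2.2)) : Int), x.2.2))) := by
      have hlen : ((pre.length : Int) + 1) = (((pre ++ [t]).length : Nat) : Int) := by simp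
      have htail := ih (pre ++ [t]) t.2.2 _ hpw.2 (fun u hu => hpw.1 u hu)
        (fun u hu => by
          rcases List.mem_append.1 hu with hu | hu
          · exact le_trans htL (hge u hu)
          · simp at hu; simp [hu])
        hcur'
      rw [← hlen] at htail
      rw [htail]
      simp only [List.append_assoc, List.singleton_append]
    rw [show pvRanksA (some L) cur (pre.length : Int) (t :: ts)
        = (t.1, pvCur (some L) cur ((pre.length : Int) + 1) t.2.2, t.2.2)
          :: pvRanksA (some t.2.2) (pvCur (some L) cur ((pre.length : Int) + 1) t.2.2)
             ((pre.length : Int) + 1) ts from rfl]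
    rw [List.map_cons, hrec, hhead]

theorem pv_ranksA_none (l : List (String × String × Int))
    (h : l.Pairwise (fun a b => b.2.2 ≤ a.2.2)) :
    pvRanksA none 0 0 l
      = l.map (fun t => (t.1, (1 + (l.countP (fun u => decide (t.2.2 < u.2.2)) : Int), t.2.2))) := by
  cases l with
  | nil => simp [pvRanksA]
  | cons t ts =>
    rw [List.pairwise_cons] at h
    have hts0 : (t :: ts).countP (fun u => decide (t.2.2 < u.2.2)) = 0 := by
      rw [List.countP_eq_zero]
      intro u hu
      rcases List.mem_cons.1 hu with rfl | hu
      · simp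
      · simpa using not_lt.mpr (h.1 u hu)
    have htail := pv_ranksA_some ts [t] t.2.2 ((0 : Int) + 1) h.2 (fun u hu => h.1 u hu)
      (fun u hu => by simp at hu; simp [hu]) (by simp)
    rw [show (([t].length : Nat) : Int) = (0 : Int) + 1 by simp] at htail
    simp only [List.cons_append, List.nil_append] at htail
    rw [show pvRanksA none 0 0 (t :: ts)
        = (t.1, (0 : Int) + 1, t.2.2)
          :: pvRanksA (some t.2.2) ((0 : Int) + 1) ((0 : Int) + 1) ts from rfl]
    rw [List.map_cons, htail, hts0]
    simp

-- ===== VERDICT (by name: the statement is the Claim_ definition above) =====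
theorem dedup_and_rank_py_spec : Claim_equal_dedup_and_rank_py := by
  intro rows _
  unfold Spec_dedup_and_rank_py
  show dedup_and_rank_py rows = dedup_and_rank_py_alt rows
  unfold dedup_and_rank_py dedup_and_rank_py_alt
  refine Prod.ext rfl ?_
  show ((pvOrdered rows).foldl pvRankStep
    ((PySem.Dict.empty : PySem.Dict String (Int × Int)), (none : Option Int), (0 : Int), (0 : Int))).1.items
    = (pvOrdered rows).map (fun t => (t.1, (1 + ((pvOrdered rows).countP (fun u => decide (t.2.2 < u.2.2)) : Int), t.2.2)))
  rw [pv_foldl_rank_items _ _ _ _ _ (pv_ordered_keys_nodup rows) (fun t _ => by simp [PySem.Dict.contains, PySem.Dict.empty])]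
  rw [show (PySem.Dict.empty : PySem.Dict String (Int × Int)).items = [] from rfl, List.nil_append]
  exact pv_ranksA_none _ (pv_ordered_pairwise rows)
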